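-- pv_equiv track=rewrite | github.com/zerohoon0102/Algorithm | programmers/p118670.py | solution
-- ===== SOURCE A (Python) =====
-- from collections import deque
--
-- def rotate(left, right, top, bottom):
--     # 왼쪽 위 모서리
--     lt = left.popleft()
--     top.appendleft(lt)
--     # 오른쪽 위 모서리
--     tr = top.pop()
--     right.appendleft(tr)
--     # 오른쪽 아래 모서리
--     rb = right.pop()
--     bottom.append(rb)
--     # 왼쪽 아래 모서리
--     bl = bottom.popleft()
--     left.append(bl)
--
-- def shift_row(left, right, center):
--     # 왼쪽 라인 교체
--     left.appendleft(left.pop())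
--     # 오른쪽 라인 교체
--     right.appendleft(right.pop())
--     # 가운데 교체
--     center.appendleft(center.pop())
--
-- def solution(rc, operations):
--     answer = []
--     center = deque([])
--     left, right = deque([]), deque([])
--     for idx, row in enumerate(rc):
--         left.append(row[0])
--         right.append(row[-1])
--         center.append(deque(row[1:len(row)-1]))
--
--     for operation in operations:
--         if operation ==  "Rotate":
--             rotate(left=left, right=right, top=center[0], bottom=center[-1])
--         elif operation == "ShiftRow":
--             shift_row(left=left, right=right, center=center)
--
--     for i in range(len(rc)):
--         arr = []
--         arr.append(left[i])
--         for v in center[i]: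
--             arr.append(v)
--         arr.append(right[i])
--         answer.append(arr)
--     return answer
-- ===== SOURCE B (Python) =====
-- def solution(rc, operations):
--     grid = [list(row) for row in rc]
--     for op in operations:
--         if op == "Rotate":
--             n = len(grid)
--             new = [[grid[1][0]] + grid[0][:-1]]
--             for i in range(1, n - 1):
--                 new.append([grid[i + 1][0]] + grid[i][1:-1] + [grid[i - 1][-1]])
--             new.append(grid[-1][1:] + [grid[-2][-1]])
--             grid = new
--         elif op == "ShiftRow":
--             grid = [grid[-1]] + grid[:-1]
--     return grid
-- ===== Notes on version B (the rewrite author's own statement) =====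
-- stated objective: simpler
-- what changed: B keeps the grid as one plain 2-D list, rebuilding the rotated outer border row-by-row on each Rotate and rotating the row list on each ShiftRow, instead of A's three-deque decomposition (left column, right column, center rows) with corner-by-corner deque surgery and a final reassembly pass.
-- outside the precondition, e.g. on solution([[5]], []): A returns [[5, 5]], B returns [[5]]; on solution([[1, 2]], ['Rotate']): A returns [[2, 1]], B raises IndexError
import Mathlib
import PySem

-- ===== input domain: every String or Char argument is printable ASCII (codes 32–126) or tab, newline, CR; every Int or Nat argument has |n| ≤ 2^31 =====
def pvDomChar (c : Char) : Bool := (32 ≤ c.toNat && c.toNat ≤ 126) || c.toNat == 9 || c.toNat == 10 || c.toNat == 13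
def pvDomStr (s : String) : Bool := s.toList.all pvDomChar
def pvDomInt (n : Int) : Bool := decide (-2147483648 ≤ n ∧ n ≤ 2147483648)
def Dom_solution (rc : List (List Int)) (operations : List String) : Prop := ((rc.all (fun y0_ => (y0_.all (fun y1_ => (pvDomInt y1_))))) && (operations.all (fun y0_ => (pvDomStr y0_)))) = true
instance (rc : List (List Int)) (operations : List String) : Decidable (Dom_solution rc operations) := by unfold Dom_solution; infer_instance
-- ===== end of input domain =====

-- B replaces A's three-deque decomposition by a plain 2-D grid; equivalence is about return values
-- (A does not mutate its arguments).

-- ===== PORT A =====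
-- deque center[-1] mutation: rebuild the list with its last element replaced (empty list stays empty,
-- matching that Python would have raised there — such inputs are outside Pre_).
def pyModifyLast (f : List Int → List Int) (xs : List (List Int)) : List (List Int) :=
  xs.dropLast ++ (xs.getLast?.map f).toList

-- rotate(left, right, top, bottom) with top = center[0], bottom = center[-1]; the deque mutations are
-- performed sequentially on the center list itself, so the top/bottom aliasing of a 1-row grid is kept.
-- popleft/pop of an empty deque (an IndexError in Python) reads a default — outside Pre_ only.
def pyRotateA (left right : List Int) (center : List (List Int)) :
    List Int × List Int × List (List Int) :=
  let lt := left.headD 0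
  let left := left.tail
  let center := center.modifyHead (fun t => lt :: t)
  let tr := (center.headD []).getLastD 0
  let center := center.modifyHead List.dropLast
  let right := tr :: right
  let rb := right.getLastD 0
  let right := right.dropLast
  let center := pyModifyLast (fun b => b ++ [rb]) center
  let bl := (center.getLastD []).headD 0
  let center := pyModifyLast List.tail center
  (left ++ [bl], right, center)

-- shift_row(left, right, center)
def pyShiftA (left right : List Int) (center : List (List Int)) :
    List Int × List Int × List (List Int) :=
  (left.getLastD 0 :: left.dropLast, right.getLastD 0 :: right.dropLast,
   center.getLastD [] :: center.dropLast)

-- row[0] → headD, row[-1] → getLastD (exact for nonempty rows; empty rows raise in Python and are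
-- outside Pre_); row[1:len(row)-1] → tail.dropLast (exact for all rows).
def solution (rc : List (List Int)) (operations : List String) : List (List Int) :=
  let init : List Int × List Int × List (List Int) :=
    rc.foldl (fun s row =>
      (s.1 ++ [row.headD 0], s.2.1 ++ [row.getLastD 0], s.2.2 ++ [row.tail.dropLast]))
      ([], [], [])
  let st := operations.foldl (fun s op =>
      if op = "Rotate" then pyRotateA s.1 s.2.1 s.2.2
      else if op = "ShiftRow" then pyShiftA s.1 s.2.1 s.2.2
      else s) init
  (List.range rc.length).map (fun i =>
      st.1.getD i 0 :: (st.2.2.getD i [] ++ [st.2.1.getD i 0]))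

-- ===== PORT B =====
-- grid[i][0] → headD, grid[i][-1]/grid[-2][-1] → getLastD, slices → tail/dropLast (exact on Pre_);
-- range(1, n-1) → List.range' 1 (n-2).
def rotateGrid (g : List (List Int)) : List (List Int) :=
  let n := g.length
  let first := (g.getD 1 []).headD 0 :: (g.headD []).dropLast
  let mids := (List.range' 1 (n - 2)).map (fun i =>
      (g.getD (i + 1) []).headD 0 :: ((g.getD i []).tail.dropLast ++ [(g.getD (i - 1) []).getLastD 0]))
  let last := (g.getLastD []).tail ++ [(g.getD (n - 2) []).getLastD 0]
  (first :: mids) ++ [last]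

def solution_alt (rc : List (List Int)) (operations : List String) : List (List Int) :=
  operations.foldl (fun g op =>
      if op = "Rotate" then rotateGrid g
      else if op = "ShiftRow" then g.getLastD [] :: g.dropLast
      else g) rc

-- ===== PRECONDITION & SPEC =====
-- Pre_ excludes grids containing a row with fewer than 2 entries (A raises on empty rows, and on
-- 1-entry rows its left/right split duplicates the single value into two output columns — an artefact
-- B does not reproduce), and single-row/empty grids combined with mutating operations (A's top/bottom
-- deque aliasing then yields an accidental value or raises; B raises there).
def Pre_solution (rc : List (List Int)) (operations : List String) : Prop :=
  (∀ r ∈ rc, 2 ≤ r.length) ∧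
  (2 ≤ rc.length ∨ ("Rotate" ∉ operations ∧ (1 ≤ rc.length ∨ "ShiftRow" ∉ operations)))
instance (rc : List (List Int)) (operations : List String) : Decidable (Pre_solution rc operations) := by
  unfold Pre_solution; infer_instance

def pvWitness_solution : List (List Int) × List String :=
  ([[1, 2, 3], [4, 5, 6], [7, 8, 9]], ["Rotate", "ShiftRow", "Rotate"])

def Spec_solution (rc : List (List Int)) (operations : List String) (out : List (List Int)) : Prop := out = solution_alt rc operations
instance (rc : List (List Int)) (operations : List String) (out : List (List Int)) : Decidable (Spec_solution rc operations out) := by unfold Spec_solution; infer_instance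

-- ===== CLAIM (what is proved, stated in full; the proofs are below) =====
def Claim_equal_solution : Prop := ∀ (rc : List (List Int)) (operations : List String), Dom_solution rc operations → Pre_solution rc operations → Spec_solution rc operations (solution rc operations)

-- ===== LEMMAS AND PROOFS =====

-- the three components A maintains, as functions of the full grid
def hF (r : List Int) : Int := r.headD 0
def lF (r : List Int) : Int := r.getLastD 0
def mF (r : List Int) : List Int := r.tail.dropLast

-- row decomposition facts
theorem getLastD_eq_getLast {α : Type} (xs : List α) (h : xs ≠ []) (d : α) :
    xs.getLastD d = xs.getLast h := by
  simp [List.getLastD_eq_getLast?, List.getLast?_eq_some_getLast h]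

theorem hF_mF_lF (r : List Int) (h : 2 ≤ r.length) : hF r :: (mF r ++ [lF r]) = r := by
  cases r with
  | nil => simp at h
  | cons a rest =>
    have hrest : rest ≠ [] := by intro he; subst he; simp at h
    simp only [hF, mF, lF, List.tail_cons, List.headD_cons]
    rw [List.getLastD_cons, getLastD_eq_getLast rest hrest, List.dropLast_append_getLast hrest]

theorem hF_mF_dropLast (r : List Int) (h : 2 ≤ r.length) : hF r :: mF r = r.dropLast := by
  cases r with
  | nil => simp at h
  | cons a rest =>
    have hrest : rest ≠ [] := by intro he; subst he; simp at h
    simp [hF, mF, List.dropLast_cons_of_ne_nil hrest]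

theorem mF_lF_tail (r : List Int) (h : 2 ≤ r.length) : mF r ++ [lF r] = r.tail := by
  have := hF_mF_lF r h
  have h2 : (hF r :: (mF r ++ [lF r])).tail = r.tail := by rw [this]
  simpa using h2

-- the initial build loop produces the three column/center maps
theorem init_eq (rc : List (List Int)) :
    rc.foldl (fun s row =>
      (s.1 ++ [row.headD 0], s.2.1 ++ [row.getLastD 0], s.2.2 ++ [row.tail.dropLast]))
      (([], [], []) : List Int × List Int × List (List Int))
    = (rc.map hF, rc.map lF, rc.map mF) := by
  suffices h : ∀ (a b : List Int) (c : List (List Int)),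
      rc.foldl (fun s row =>
        (s.1 ++ [row.headD 0], s.2.1 ++ [row.getLastD 0], s.2.2 ++ [row.tail.dropLast]))
        (a, b, c) = (a ++ rc.map hF, b ++ rc.map lF, c ++ rc.map mF) by
    simpa using h [] [] []
  induction rc with
  | nil => simp
  | cons r t ih =>
    intro a b c
    simp only [List.foldl_cons]
    rw [ih]
    simp [hF, lF, mF]

theorem map_range'_getD_add {α β : Type} [Inhabited α] (F : α → β) (g : List α) (d : α) (j k s : ℕ)
    (h : j + s + k ≤ g.length) :
    (List.range' j k).map (fun i => F (g.getD (i + s) d)) = ((g.drop (j + s)).take k).map F := by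
  apply List.ext_getElem
  · simp; omega
  · intro i h1 h2
    have hik : i < k := by simpa using h1
    have hlt : j + s + i < g.length := by omega
    have hidx : j + i + s = j + s + i := by ring
    simp [List.getElem_range', List.getD_eq_getElem?_getD, hidx, List.getElem?_eq_getElem hlt]

theorem map_range'_getD_sub {α β : Type} [Inhabited α] (F : α → β) (g : List α) (d : α) (k : ℕ)
    (h : k ≤ g.length) :
    (List.range' 1 k).map (fun i => F (g.getD (i - 1) d)) = (g.take k).map F := by
  apply List.ext_getElem
  · simp; omega
  · intro i h1 h2
    have hik : i < k := by simpa using h1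
    have hlt : i < g.length := by omega
    have hidx : 1 + i - 1 = i := by omega
    simp [List.getElem_range', List.getD_eq_getElem?_getD, hidx, List.getElem?_eq_getElem hlt]

theorem pyModifyLast_cons (f : List Int → List Int) (x : List Int) (ys : List (List Int))
    (h : ys ≠ []) :
    pyModifyLast f (x :: ys) = x :: (ys.dropLast ++ [f (ys.getLast h)]) := by
  have h1 : (x :: ys).getLast? = some ((x :: ys).getLast (by simp)) :=
    List.getLast?_eq_some_getLast (by simp)
  rw [pyModifyLast, h1, List.dropLast_cons_of_ne_nil h, List.getLast_cons h]
  simp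

-- one Rotate step commutes with the encoding
theorem rotate_eq (g : List (List Int)) (hn : 2 ≤ g.length) (hr : ∀ r ∈ g, 2 ≤ r.length) :
    pyRotateA (g.map hF) (g.map lF) (g.map mF)
      = ((rotateGrid g).map hF, (rotateGrid g).map lF, (rotateGrid g).map mF) := by
  obtain ⟨r0, t0, rfl⟩ : ∃ a b, g = a :: b := by
    cases g with
    | nil => simp at hn
    | cons a b => exact ⟨a, b, rfl⟩
  obtain ⟨th, tt, rfl⟩ : ∃ a b, t0 = a :: b := by
    cases t0 with
    | nil => simp at hn
    | cons a b => exact ⟨a, b, rfl⟩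
  have htne : (th :: tt : List (List Int)) ≠ [] := by simp
  have hr0 : 2 ≤ r0.length := hr r0 List.mem_cons_self
  have hrl : 2 ≤ ((th :: tt).getLast htne).length :=
    hr _ (List.mem_cons_of_mem _ (List.getLast_mem htne))
  have hd0 : r0.dropLast ≠ [] := List.ne_nil_of_length_pos (by rw [List.length_dropLast]; omega)
  obtain ⟨c, cs, hc⟩ : ∃ c cs, ((th :: tt).getLast htne).tail = c :: cs := by
    cases hcc : ((th :: tt).getLast htne).tail with
    | nil =>
      exact absurd hcc (List.ne_nil_of_length_pos (by rw [List.length_tail]; omega))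
    | cons c cs => exact ⟨c, cs, rfl⟩
  have e_rb : (List.map lF tt).getLastD (lF th) = lF ((th :: tt).getLast htne) := by
    rcases eq_or_ne tt [] with rfl | htt
    · simp [List.getLastD]
    · have hm : List.map lF tt ≠ [] := by simpa using htt
      rw [getLastD_eq_getLast _ hm, List.getLast_map, List.getLast_cons htt]
  have e_gl : (mF th :: List.map mF tt).getLast (by simp) = mF ((th :: tt).getLast htne) := by
    have h2 := List.getLast_map (f := mF) (l := th :: tt) (by simp)
    simpa using h2
  have hL : pyRotateA (List.map hF (r0 :: th :: tt)) (List.map lF (r0 :: th :: tt))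
        (List.map mF (r0 :: th :: tt))
      = (hF th :: List.map hF tt ++ [c],
         r0.dropLast.getLastD 0 :: lF r0 :: (lF th :: List.map lF tt).dropLast,
         r0.dropLast.dropLast :: ((mF th :: List.map mF tt).dropLast ++ [cs])) := by
    simp only [List.map_cons, pyRotateA, List.modifyHead_cons, List.headD_cons, List.tail_cons,
      List.getLastD_cons, List.dropLast_cons₂]
    rw [hF_mF_dropLast r0 hr0, e_rb,
      pyModifyLast_cons _ _ _ (show (mF th :: List.map mF tt) ≠ [] by simp)]
    rw [e_gl]
    rw [mF_lF_tail _ hrl, hc,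
      pyModifyLast_cons _ _ _
        (show (mF th :: List.map mF tt).dropLast ++ [c :: cs] ≠ [] by simp)]
    rw [List.getLast_concat, List.dropLast_concat]
    have e_tr : (mF r0).getLastD (hF r0) = r0.dropLast.getLastD 0 := by
      have h3 := (List.getLastD_cons (a := (0 : Int)) (b := hF r0) (l := mF r0)).symm
      rw [h3, hF_mF_dropLast r0 hr0]
    simp only [List.getLastD_cons, List.getLastD_concat, List.headD_cons, List.tail_cons, e_tr]
  rw [hL]
  have e_last : ((r0 :: th :: tt : List (List Int)).getLastD []) = (th :: tt).getLast htne := by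
    rw [List.getLastD_cons, ← getLastD_eq_getLast (th :: tt) htne r0, List.getLastD_cons]
  have hG : rotateGrid (r0 :: th :: tt)
      = (th.headD 0 :: r0.dropLast)
        :: ((List.range' 1 tt.length).map (fun i =>
             ((r0 :: th :: tt).getD (i + 1) []).headD 0
             :: (((r0 :: th :: tt).getD i []).tail.dropLast
                ++ [((r0 :: th :: tt).getD (i - 1) []).getLastD 0]))
        ++ [(c :: cs) ++ [((r0 :: th :: tt).getD tt.length []).getLastD 0]]) := by
    simp only [rotateGrid, List.length_cons, List.headD_cons, List.getD_cons_succ,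
      List.getD_cons_zero, e_last, hc]
    simp
  rw [hG]
  simp only [List.map_cons, List.map_append, List.map_map, List.map_map]
  simp only [Function.comp_def, hF, lF, mF, List.headD_cons, List.tail_cons,
    List.cons_append, List.dropLast_concat, List.getLastD_cons, List.getLastD_concat]
  have hlt : tt.length < (r0 :: th :: tt : List (List Int)).length := by simp
  have e_hF : (List.range' 1 tt.length).map
        (fun i => ((r0 :: th :: tt).getD (i + 1) ([] : List Int)).headD 0)
      = (((r0 :: th :: tt).drop 2).take tt.length).map (fun r => r.headD 0) :=
    map_range'_getD_add (fun r => r.headD 0) (r0 :: th :: tt : List (List Int)) [] 1 tt.length 1 (by simp only [List.length_cons]; omega)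
  have e_mF : (List.range' 1 tt.length).map
        (fun i => ((r0 :: th :: tt).getD i ([] : List Int)).tail.dropLast)
      = (((r0 :: th :: tt).drop 1).take tt.length).map (fun r => r.tail.dropLast) := by
    have h7 := map_range'_getD_add (fun r => r.tail.dropLast)
      (r0 :: th :: tt : List (List Int)) [] 1 tt.length 0 (by simp only [List.length_cons]; omega)
    simpa using h7
  have e_lF : (List.range' 1 tt.length).map
        (fun i => ((r0 :: th :: tt).getD (i - 1) ([] : List Int)).getLastD 0)
      = (((r0 :: th :: tt).take tt.length)).map (fun r => r.getLastD 0) :=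
    map_range'_getD_sub (fun r => r.getLastD 0) (r0 :: th :: tt : List (List Int)) [] tt.length (by simp only [List.length_cons]; omega)
  simp only [e_hF, e_mF, e_lF, List.map_nil]
  rw [show hF = (fun r : List Int => r.headD 0) from rfl,
      show lF = (fun r : List Int => r.getLastD 0) from rfl,
      show mF = (fun r : List Int => r.tail.dropLast) from rfl]
  have e_d2 : List.take tt.length (List.drop 2 (r0 :: th :: tt)) = tt := by simp
  have e_d1 : List.take tt.length (List.drop 1 (r0 :: th :: tt)) = (th :: tt).dropLast := by
    rw [List.dropLast_eq_take]; simp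
  have e_mtc : (List.map (fun r : List Int => r.getLastD 0) (List.take tt.length (r0 :: th :: tt)))
      ++ [((r0 :: th :: tt).getD tt.length ([] : List Int)).getLastD 0]
      = List.map (fun r : List Int => r.getLastD 0) ((r0 :: th :: tt).take (tt.length + 1)) := by
    rw [List.take_add_one, List.map_append]
    congr 1
    rw [List.getElem?_eq_getElem hlt, List.getD_eq_getElem?_getD, List.getElem?_eq_getElem hlt]
    rfl
  have e_dl : (r0 :: th :: tt : List (List Int)).take (tt.length + 1) = (r0 :: th :: tt).dropLast := by
    rw [List.dropLast_eq_take]; simp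
  simp only [e_d2, e_d1]
  rw [e_mtc, e_dl]
  simp only [List.dropLast_cons₂, List.map_cons, List.map_dropLast]
  rw [getLastD_eq_getLast r0.dropLast hd0 0, getLastD_eq_getLast r0.dropLast hd0 (th.headD 0)]

theorem rotate_len (g : List (List Int)) (hn : 2 ≤ g.length) :
    (rotateGrid g).length = g.length := by
  simp [rotateGrid]; omega

theorem rotate_rows (g : List (List Int)) (hn : 2 ≤ g.length) (hr : ∀ r ∈ g, 2 ≤ r.length) :
    ∀ r ∈ rotateGrid g, 2 ≤ r.length := by
  intro r hmem
  have hg : g ≠ [] := by intro he; subst he; simp at hn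
  simp only [rotateGrid, List.mem_append, List.mem_cons, List.mem_map] at hmem
  rcases hmem with (h | ⟨i, hi, h⟩) | (h | h)
  · subst h
    have hh : 2 ≤ (g.head hg).length := hr _ (List.head_mem hg)
    simp [List.head?_eq_some_head hg]
    omega
  · subst h; simp
  · subst h
    have hh : 2 ≤ (g.getLast hg).length := hr _ (List.getLast_mem hg)
    rw [getLastD_eq_getLast _ hg]
    simp
    omega
  · simp at h

-- one ShiftRow step commutes with the encoding
theorem shift_eq (g : List (List Int)) (hg : g ≠ []) :
    pyShiftA (g.map hF) (g.map lF) (g.map mF)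
      = ((g.getLastD [] :: g.dropLast).map hF, (g.getLastD [] :: g.dropLast).map lF,
         (g.getLastD [] :: g.dropLast).map mF) := by
  have hs : g.getLast? = some (g.getLast hg) := List.getLast?_eq_some_getLast hg
  simp [pyShiftA, hs, List.map_dropLast, List.getLastD_eq_getLast?, List.getLast?_map]

-- the operation fold commutes with the encoding and preserves the shape invariants
theorem fold_inv (ops : List String) (g : List (List Int))
    (hr : ∀ r ∈ g, 2 ≤ r.length)
    (hc : 2 ≤ g.length ∨ ("Rotate" ∉ ops ∧ (1 ≤ g.length ∨ "ShiftRow" ∉ ops))) :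
    ops.foldl (fun s op =>
        if op = "Rotate" then pyRotateA s.1 s.2.1 s.2.2
        else if op = "ShiftRow" then pyShiftA s.1 s.2.1 s.2.2
        else s) (g.map hF, g.map lF, g.map mF)
      = ((ops.foldl (fun g op =>
            if op = "Rotate" then rotateGrid g
            else if op = "ShiftRow" then g.getLastD [] :: g.dropLast
            else g) g).map hF,
         (ops.foldl (fun g op =>
            if op = "Rotate" then rotateGrid g
            else if op = "ShiftRow" then g.getLastD [] :: g.dropLast
            else g) g).map lF,
         (ops.foldl (fun g op =>
            if op = "Rotate" then rotateGrid g
            else if op = "ShiftRow" then g.getLastD [] :: g.dropLast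
            else g) g).map mF)
      ∧ (∀ r ∈ ops.foldl (fun g op =>
            if op = "Rotate" then rotateGrid g
            else if op = "ShiftRow" then g.getLastD [] :: g.dropLast
            else g) g, 2 ≤ r.length)
      ∧ (ops.foldl (fun g op =>
            if op = "Rotate" then rotateGrid g
            else if op = "ShiftRow" then g.getLastD [] :: g.dropLast
            else g) g).length = g.length := by
  induction ops generalizing g with
  | nil => exact ⟨rfl, hr, rfl⟩
  | cons op rest ih =>
    by_cases hR : op = "Rotate"
    · subst hR
      have hn : 2 ≤ g.length := by
        rcases hc with h | h
        · exact h
        · exact absurd (List.mem_cons_self) h.1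
      simp only [List.foldl_cons, reduceIte]
      rw [rotate_eq g hn hr]
      have hn' : 2 ≤ (rotateGrid g).length := by rw [rotate_len g hn]; exact hn
      have h := ih (rotateGrid g) (rotate_rows g hn hr) (Or.inl hn')
      exact ⟨h.1, h.2.1, by rw [h.2.2, rotate_len g hn]⟩
    · by_cases hS : op = "ShiftRow"
      · subst hS
        have hg : g ≠ [] := by
          rcases hc with h | ⟨_, h1 | h1⟩
          · exact List.ne_nil_of_length_pos (by omega)
          · exact List.ne_nil_of_length_pos (by omega)
          · exact absurd (List.mem_cons_self) h1
        have hr' : ∀ r ∈ g.getLastD [] :: g.dropLast, 2 ≤ r.length := by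
          intro r hmem
          rcases List.mem_cons.1 hmem with h | h
          · subst h
            rw [getLastD_eq_getLast _ hg]
            exact hr _ (List.getLast_mem hg)
          · exact hr _ (List.Sublist.subset (List.dropLast_sublist g) h)
        have hlen : (g.getLastD [] :: g.dropLast).length = g.length := by
          have := List.length_pos_iff.2 hg
          simp
          omega
        have hc' : 2 ≤ (g.getLastD [] :: g.dropLast).length ∨
            ("Rotate" ∉ rest ∧ (1 ≤ (g.getLastD [] :: g.dropLast).length ∨ "ShiftRow" ∉ rest)) := by
          rcases hc with h | ⟨h1, _⟩
          · left; omega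
          · right
            exact ⟨fun hm => h1 (List.mem_cons_of_mem _ hm), Or.inl (by simp)⟩
        simp only [List.foldl_cons, reduceIte,
          if_neg (by decide : ¬("ShiftRow" : String) = "Rotate")]
        rw [shift_eq g hg]
        have h := ih _ hr' hc'
        exact ⟨h.1, h.2.1, by rw [h.2.2, hlen]⟩
      · simp only [List.foldl_cons, if_neg hR, if_neg hS]
        apply ih g hr
        rcases hc with h | ⟨h1, h2⟩
        · exact Or.inl h
        · refine Or.inr ⟨fun hm => h1 (List.mem_cons_of_mem _ hm), ?_⟩
          rcases h2 with h2 | h2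
          · exact Or.inl h2
          · exact Or.inr fun hm => h2 (List.mem_cons_of_mem _ hm)

-- A's final reassembly loop reconstructs exactly the grid
theorem reassemble (g : List (List Int)) (hr : ∀ r ∈ g, 2 ≤ r.length) :
    (List.range g.length).map (fun i =>
      (g.map hF).getD i 0 :: ((g.map mF).getD i [] ++ [(g.map lF).getD i 0])) = g := by
  apply List.ext_getElem
  · simp
  · intro i h1 h2
    have hi : i < g.length := by simpa using h1
    simp [List.getD_eq_getElem?_getD, List.getElem?_eq_getElem hi]
    exact hF_mF_lF g[i] (hr g[i] (List.getElem_mem hi))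

-- ===== VERDICT (by name: the statement is the Claim_ definition above) =====
theorem solution_spec : Claim_equal_solution := by
  intro rc operations _ hpre
  obtain ⟨hr, hc⟩ := hpre
  have h := fold_inv operations rc hr hc
  unfold Spec_solution solution solution_alt
  simp only [init_eq, h.1]
  rw [← h.2.2]
  exact reassemble _ h.2.1
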